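-- pv_equiv track=rewrite | github.com/Skymemory/LeetCode | solutions/410.py | check
-- ===== SOURCE A (Python) =====
-- def check(nums, m, possible):
--     i, cnt = 0, 0
--     while i < len(nums) and cnt < m:
--         ss, j = 0, i
--         while j < len(nums):
--             if nums[j] > possible:
--                 return False
--             if ss + nums[j] <= possible:
--                 ss += nums[j]
--                 j += 1
--             else:
--                 break
--         i = j
--         cnt += 1
--     return cnt <= m and i >= len(nums)
-- ===== SOURCE B (Python) =====
-- def check(nums, m, possible):
--     # stage 1: any single element over the cap makes every split impossible
--     if any(x > possible for x in nums):
--         return False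
--     # stage 2: prefix-sum array
--     pref = [0]
--     for x in nums:
--         pref.append(pref[-1] + x)
--     # stage 3: walk the indices keeping only the base (start) of the current
--     # segment; a cut happens at j when the prefix accumulated since the base
--     # exceeds the cap
--     cuts = 0
--     base = 0
--     for j in range(1, len(nums)):
--         if pref[j + 1] - pref[base] > possible:
--             cuts += 1
--             base = j
--     segs = cuts + 1 if nums else 0
--     return segs <= m
-- ===== Notes on version B (the rewrite author's own statement) =====
-- stated objective: alternative
-- what changed: Replaces A's interleaved nested while loops (per-segment running sum rebuilt by inner indexing, outer loop cut off early once cnt reaches m, oversize elements detected mid-scan) with three staged passes: a validity pass (any element > possible), the construction of a prefix-sum array, and a cut-counting walk that keeps only the base index of the current segment and compares prefix differences, with the m comparison done once at the end.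
import Mathlib
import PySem

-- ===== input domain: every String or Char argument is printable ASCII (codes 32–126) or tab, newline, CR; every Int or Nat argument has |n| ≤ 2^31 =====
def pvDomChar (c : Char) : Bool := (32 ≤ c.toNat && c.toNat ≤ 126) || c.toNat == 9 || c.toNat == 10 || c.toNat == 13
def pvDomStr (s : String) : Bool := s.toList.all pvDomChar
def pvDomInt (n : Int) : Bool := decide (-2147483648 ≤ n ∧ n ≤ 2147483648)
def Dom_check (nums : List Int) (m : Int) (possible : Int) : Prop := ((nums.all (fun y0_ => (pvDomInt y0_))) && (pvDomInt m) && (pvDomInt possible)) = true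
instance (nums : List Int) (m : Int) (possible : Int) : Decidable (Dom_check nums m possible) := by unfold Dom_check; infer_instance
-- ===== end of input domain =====

-- B replaces A's interleaved nested while loops (per-segment running sum, early cutoff at
-- m segments) with three staged passes: a validity pass, a prefix-sum array, and a
-- base-pointer cut count compared with m once at the end; same return value (alternative).

-- ===== PORT A =====
-- A's inner while loop: state (ss, j); `none` = the Python `return False`,
-- `some j'` = the loop left j at j'.  (i and j are Python ints that stay ≥ 0,
-- so they are carried as Nat; nums[j] is only read with j < len, as in A.)
def checkInner (nums : List Int) (possible : Int) (ss : Int) (j : Nat) : Option Nat :=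
  if h : j < nums.length then
    if nums[j] > possible then none
    else if ss + nums[j] ≤ possible then checkInner nums possible (ss + nums[j]) (j + 1)
    else some j
  else some j
termination_by nums.length - j

-- A's outer while loop: state (i, cnt); terminates because cnt increases toward m,
-- exactly as in the Python.
def checkOuter (nums : List Int) (m : Int) (possible : Int) (i : Nat) (cnt : Int) : Bool :=
  if _h : i < nums.length ∧ cnt < m then
    match checkInner nums possible 0 i with
    | none => false
    | some j => checkOuter nums m possible j (cnt + 1)
  else decide (cnt ≤ m) && decide (nums.length ≤ i)
termination_by (m - cnt).toNat
decreasing_by omega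

def check (nums : List Int) (m : Int) (possible : Int) : Bool :=
  checkOuter nums m possible 0 0

-- ===== PORT B =====
-- B's stage-2 loop `for x in nums: pref.append(pref[-1] + x)`; pref is never empty,
-- so `pref[-1]` is exactly `getLastD 0`.
def prefLoop (pref : List Int) : List Int → List Int
  | [] => pref
  | x :: xs => prefLoop (pref ++ [pref.getLastD 0 + x]) xs

-- B's stage-3 loop `for j in range(1, len(nums))` with state (cuts, base); pref has
-- length n+1 and the accessed indices j+1 ≤ n and base ≤ n are in range, so `getD _ 0`
-- is exactly Python's pref[...] here.
def cutLoop (pref : List Int) (possible : Int) (n : Nat) (j : Nat) (cuts : Int) (base : Nat) : Int :=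
  if j < n then
    if pref.getD (j + 1) 0 - pref.getD base 0 > possible then
      cutLoop pref possible n (j + 1) (cuts + 1) j
    else cutLoop pref possible n (j + 1) cuts base
  else cuts
termination_by n - j

def check_alt (nums : List Int) (m : Int) (possible : Int) : Bool :=
  if nums.any (fun x => decide (x > possible)) then false
  else
    let pref := prefLoop [0] nums
    let cuts := cutLoop pref possible nums.length 1 0 0
    let segs : Int := if nums.isEmpty then 0 else cuts + 1
    decide (segs ≤ m)

-- ===== PRECONDITION & SPEC =====
def Spec_check (nums : List Int) (m : Int) (possible : Int) (out : Bool) : Prop := out = check_alt nums m possible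
instance (nums : List Int) (m : Int) (possible : Int) (out : Bool) : Decidable (Spec_check nums m possible out) := by unfold Spec_check; infer_instance

-- ===== CLAIM (what is proved, stated in full; the proofs are below) =====
def Claim_equal_check : Prop := ∀ (nums : List Int) (m : Int) (possible : Int), Dom_check nums m possible → Spec_check nums m possible (check nums m possible)

-- ===== LEMMAS AND PROOFS =====

-- Common reference point: `fill possible ss l` extends the current segment (sum ss so far)
-- along l, returning the unconsumed suffix, `none` on an element > possible.
def fill (possible : Int) (ss : Int) : List Int → Option (List Int)
  | [] => some []
  | x :: xs =>
    if x > possible then none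
    else if ss + x ≤ possible then fill possible (ss + x) xs
    else some (x :: xs)

theorem fill_suffix (possible ss : Int) (l rest : List Int)
    (h : fill possible ss l = some rest) : rest <:+ l := by
  induction l generalizing ss with
  | nil => simp [fill] at h; simp [h]
  | cons x xs ih =>
    simp only [fill] at h
    split_ifs at h with h1 h2
    · exact (ih _ h).trans (List.suffix_cons x xs)
    · cases h; exact List.suffix_rfl

-- `gcount possible l` = number of greedy segments, `none` if some scanned element > possible.
def gcount (possible : Int) : List Int → Option Nat
  | [] => some 0
  | x :: xs =>
    if x > possible then none
    else match h : fill possible x xs with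
      | none => none
      | some rest => (gcount possible rest).map (· + 1)
termination_by l => l.length
decreasing_by
  have := (fill_suffix possible x xs rest h).length_le
  simp; omega

theorem gcount_cons_big (possible x : Int) (xs : List Int) (h1 : x > possible) :
    gcount possible (x :: xs) = none := by
  rw [gcount.eq_def]; simp [h1]

theorem gcount_cons_none (possible x : Int) (xs : List Int) (h1 : ¬ x > possible)
    (hf : fill possible x xs = none) : gcount possible (x :: xs) = none := by
  rw [gcount.eq_def]; simp only [if_neg h1]
  split <;> simp_all

theorem gcount_cons_some (possible x : Int) (xs rest : List Int) (h1 : ¬ x > possible)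
    (hf : fill possible x xs = some rest) :
    gcount possible (x :: xs) = (gcount possible rest).map (· + 1) := by
  rw [gcount.eq_def]; simp only [if_neg h1]
  split <;> simp_all

theorem gcount_pos (possible : Int) (x : Int) (xs : List Int) (k : Nat)
    (h : gcount possible (x :: xs) = some k) : 1 ≤ k := by
  by_cases h1 : x > possible
  · rw [gcount_cons_big possible x xs h1] at h; simp at h
  · rcases hf : fill possible x xs with _ | rest
    · rw [gcount_cons_none possible x xs h1 hf] at h; simp at h
    · rw [gcount_cons_some possible x xs rest h1 hf] at h
      simp only [Option.map_eq_some_iff] at h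
      obtain ⟨k', _, hk⟩ := h; omega

-- A freshly started segment: fill from 0 vs gcount.
theorem fill0_none (possible x : Int) (xs : List Int)
    (h : fill possible 0 (x :: xs) = none) : gcount possible (x :: xs) = none := by
  simp only [fill] at h
  split_ifs at h with h1 h2
  · exact gcount_cons_big possible x xs h1
  · rw [zero_add] at h
    exact gcount_cons_none possible x xs h1 h

theorem fill0_some (possible x : Int) (xs rest : List Int)
    (h : fill possible 0 (x :: xs) = some rest) :
    ¬ x > possible ∧ fill possible x xs = some rest := by
  simp only [fill] at h
  split_ifs at h with h1 h2
  · rw [zero_add] at h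
    exact ⟨h1, h⟩
  · exfalso; omega

theorem suffix_drop_eq (nums rest : List Int) (h : rest <:+ nums) :
    nums.drop (nums.length - rest.length) = rest := by
  obtain ⟨t, rfl⟩ := h
  simp

-- A's inner loop is `fill` on the suffix, returning the index of the unconsumed suffix.
theorem checkInner_eq (nums : List Int) (possible : Int) :
    ∀ (j : Nat) (ss : Int), j ≤ nums.length →
      checkInner nums possible ss j =
        (fill possible ss (nums.drop j)).map (fun rest => nums.length - rest.length) := by
  intro j ss hj
  fun_induction checkInner nums possible ss j with
  | case1 ss j h h1 =>
    rw [List.drop_eq_getElem_cons h]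
    simp [fill, h1]
  | case2 ss j h h1 h2 ih =>
    rw [List.drop_eq_getElem_cons h]
    simp only [fill, if_neg h1, if_pos h2]
    exact ih (by omega)
  | case3 ss j h h1 h2 =>
    rw [List.drop_eq_getElem_cons h]
    simp only [fill, if_neg h1, if_neg h2, Option.map_some, Option.some.injEq,
      List.length_cons, List.length_drop]
    omega
  | case4 ss j h =>
    have : j = nums.length := by omega
    subst this
    simp [List.drop_length, fill]

theorem checkOuter_eq (nums : List Int) (m : Int) (possible : Int) :
    ∀ (i : Nat) (cnt : Int), i ≤ nums.length → 0 ≤ cnt →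
      checkOuter nums m possible i cnt =
        match gcount possible (nums.drop i) with
        | none => false
        | some k => decide (cnt + (k : Int) ≤ m) := by
  intro i cnt hi hc
  fun_induction checkOuter nums m possible i cnt with
  | case1 i cnt h hinner =>
    rcases h with ⟨hlt, hm⟩
    rw [checkInner_eq nums possible i 0 (by omega)] at hinner
    have hfn : fill possible 0 (nums.drop i) = none := by
      rcases hf : fill possible 0 (nums.drop i) with _ | r
      · rfl
      · rw [hf] at hinner; simp at hinner
    rw [List.drop_eq_getElem_cons hlt] at hfn ⊢
    rw [fill0_none possible nums[i] (nums.drop (i+1)) hfn]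
  | case2 i cnt h j hinner ih =>
    rcases h with ⟨hlt, hm⟩
    rw [checkInner_eq nums possible i 0 (by omega)] at hinner
    rcases hf : fill possible 0 (nums.drop i) with _ | rest
    · rw [hf] at hinner; simp at hinner
    · rw [hf] at hinner
      simp only [Option.map_some, Option.some.injEq] at hinner
      have hfc := hf
      rw [List.drop_eq_getElem_cons hlt] at hfc
      obtain ⟨h1, hfill⟩ := fill0_some possible nums[i] (nums.drop (i+1)) rest hfc
      have hsuf : rest <:+ nums := by
        have hs := fill_suffix possible 0 (nums.drop i) rest hf
        exact hs.trans (List.drop_suffix i nums)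
      have hdrop : nums.drop j = rest := by
        rw [← hinner]; exact suffix_drop_eq nums rest hsuf
      rw [ih (by omega) (by omega), hdrop]
      rw [List.drop_eq_getElem_cons hlt]
      rw [gcount_cons_some possible nums[i] (nums.drop (i+1)) rest h1 hfill]
      rcases hg : gcount possible rest with _ | k
      · simp
      · simp
        omega
  | case3 i cnt h =>
    by_cases hlen : nums.length ≤ i
    · have hnil : nums.drop i = [] := List.drop_eq_nil_of_le hlen
      rw [hnil, gcount]
      simp [hlen]
    · have hlt : i < nums.length := by omega
      have hm : m ≤ cnt := by omega
      rw [List.drop_eq_getElem_cons hlt]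
      rcases hg : gcount possible (nums[i] :: nums.drop (i+1)) with _ | k
      · simp [hlen]
      · have hk := gcount_pos possible nums[i] (nums.drop (i+1)) k hg
        simp only
        have : ¬ (cnt + (k : Int) ≤ m) := by omega
        simp [hlen, this]

-- ===== B-side lemmas =====

-- number of further cuts the scan makes, given current running sum ss and remaining list
def gseg (possible : Int) : Int → List Int → Nat
  | _, [] => 0
  | ss, x :: xs => if ss + x ≤ possible then gseg possible (ss + x) xs else 1 + gseg possible x xs

-- segment count of a whole (validated) list in terms of gseg
def gN (possible : Int) : List Int → Nat
  | [] => 0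
  | x :: xs => 1 + gseg possible x xs

theorem fill_some_of_all_le (possible : Int) (l : List Int)
    (hall : ∀ x ∈ l, ¬ x > possible) :
    ∀ ss, ∃ rest, fill possible ss l = some rest := by
  induction l with
  | nil => intro ss; exact ⟨[], rfl⟩
  | cons x xs ih =>
    intro ss
    have hx : ¬ x > possible := hall x (by simp)
    by_cases h2 : ss + x ≤ possible
    · obtain ⟨rest, hr⟩ := ih (fun y hy => hall y (by simp [hy])) (ss + x)
      exact ⟨rest, by simp [fill, hx, h2, hr]⟩
    · exact ⟨x :: xs, by simp [fill, hx, h2]⟩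

theorem fill_mem_big (possible : Int) (l : List Int) (x : Int)
    (hx : x ∈ l) (hbig : x > possible) :
    ∀ ss, fill possible ss l = none ∨ ∃ rest, fill possible ss l = some rest ∧ x ∈ rest := by
  induction l with
  | nil => simp at hx
  | cons y ys ih =>
    intro ss
    by_cases h1 : y > possible
    · left; simp [fill, h1]
    · have hxy : x ∈ ys := by
        rcases List.mem_cons.mp hx with rfl | h
        · exact absurd hbig h1
        · exact h
      by_cases h2 : ss + y ≤ possible
      · rcases ih hxy (ss + y) with hn | ⟨rest, hr, hm⟩
        · left; simp [fill, h1, h2, hn]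
        · right; exact ⟨rest, by simp [fill, h1, h2, hr], hm⟩
      · right; exact ⟨y :: ys, by simp [fill, h1, h2], by simp [hxy]⟩

theorem gcount_none_of_big (possible : Int) :
    ∀ (l : List Int), (∃ x ∈ l, x > possible) → gcount possible l = none := by
  intro l
  induction hn : l.length using Nat.strong_induction_on generalizing l with
  | _ n ih =>
    rcases l with _ | ⟨y, ys⟩
    · rintro ⟨x, hx, _⟩; simp at hx
    · rintro ⟨x, hx, hbig⟩
      by_cases h1 : y > possible
      · exact gcount_cons_big possible y ys h1
      · have hxy : x ∈ ys := by
          rcases List.mem_cons.mp hx with rfl | h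
          · exact absurd hbig h1
          · exact h
        rcases fill_mem_big possible ys x hxy hbig y with hfn | ⟨rest, hr, hm⟩
        · exact gcount_cons_none possible y ys h1 hfn
        · rw [gcount_cons_some possible y ys rest h1 hr]
          have hlen : rest.length < n := by
            have := (fill_suffix possible y ys rest hr).length_le
            simp at hn; omega
          rw [ih rest.length (by omega) rest rfl ⟨x, hm, hbig⟩]
          rfl

theorem fill_gseg (possible : Int) (xs : List Int) :
    ∀ ss rest, fill possible ss xs = some rest → gseg possible ss xs = gN possible rest := by
  induction xs with
  | nil => intro ss rest h; simp [fill] at h; subst h; simp [gseg, gN]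
  | cons x xs ih =>
    intro ss rest h
    simp only [fill] at h
    split_ifs at h with h1 h2
    · simp only [gseg, if_pos h2]
      exact ih (ss + x) rest h
    · cases h
      simp only [gseg, if_neg h2, gN]

theorem gcount_eq_gN (possible : Int) :
    ∀ (l : List Int), (∀ x ∈ l, ¬ x > possible) → gcount possible l = some (gN possible l) := by
  intro l
  induction hn : l.length using Nat.strong_induction_on generalizing l with
  | _ n ih =>
    rcases l with _ | ⟨y, ys⟩
    · intro _; simp [gcount, gN]
    · intro hall
      have h1 : ¬ y > possible := hall y (by simp)
      obtain ⟨rest, hr⟩ := fill_some_of_all_le possible ys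
        (fun x hx => hall x (by simp [hx])) y
      rw [gcount_cons_some possible y ys rest h1 hr]
      have hsuf := fill_suffix possible y ys rest hr
      have hlen : rest.length < n := by
        have := hsuf.length_le
        simp at hn; omega
      have hrest : ∀ x ∈ rest, ¬ x > possible := fun x hx =>
        hall x (by simp [hsuf.subset hx])
      rw [ih rest.length (by omega) rest rfl hrest]
      simp only [Option.map_some, Option.some.injEq]
      have hgN : gN possible (y :: ys) = 1 + gseg possible y ys := rfl
      rw [hgN, fill_gseg possible ys y rest hr]
      omega

-- running partial sums starting from s
def sums (s : Int) : List Int → List Int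
  | [] => []
  | x :: xs => (s + x) :: sums (s + x) xs

theorem prefLoop_eq (l : List Int) :
    ∀ p : List Int, prefLoop p l = p ++ sums (p.getLastD 0) l := by
  induction l with
  | nil => intro p; simp [prefLoop, sums]
  | cons x xs ih =>
    intro p
    simp only [prefLoop, sums]
    rw [ih (p ++ [p.getLastD 0 + x])]
    simp

theorem sums_getD (l : List Int) :
    ∀ (s : Int) (i : Nat), i < l.length → (sums s l).getD i 0 = s + (l.take (i + 1)).sum := by
  induction l with
  | nil => intro s i h; simp at h
  | cons x xs ih =>
    intro s i h
    cases i with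
    | zero => simp [sums]
    | succ i =>
      simp only [sums, List.getD_cons_succ, List.take_succ_cons, List.sum_cons]
      rw [ih (s + x) i (by simp at h; omega)]
      ring

-- pref[j] = sum of nums[:j] for j ≤ len(nums)
theorem pref_getD (nums : List Int) (j : Nat) (hj : j ≤ nums.length) :
    (prefLoop [0] nums).getD j 0 = ((nums.take j).sum : Int) := by
  rw [prefLoop_eq nums [0]]
  have h0 : ([0] : List Int).getLastD 0 = 0 := rfl
  rw [h0]
  cases j with
  | zero => simp
  | succ j =>
    have hlt : j < nums.length := by omega
    have : ([(0 : Int)] ++ sums 0 nums).getD (j + 1) 0 = (sums 0 nums).getD j 0 := by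
      simp
    rw [this, sums_getD nums 0 j hlt, zero_add]

theorem cutLoop_eq (nums : List Int) (possible : Int) :
    ∀ (j : Nat) (cuts : Int) (b : Nat), j ≤ nums.length → b ≤ nums.length →
      cutLoop (prefLoop [0] nums) possible nums.length j cuts b =
        cuts + (gseg possible ((nums.take j).sum - (nums.take b).sum) (nums.drop j) : Int) := by
  intro j cuts b hj hb
  fun_induction cutLoop (prefLoop [0] nums) possible nums.length j cuts b with
  | case1 j cuts b h hcut ih =>
    rw [pref_getD nums (j + 1) (by omega), pref_getD nums b hb] at hcut
    have htake : (nums.take (j + 1)).sum = (nums.take j).sum + nums[j] :=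
      List.sum_take_succ nums j h
    rw [ih (by omega) (by omega)]
    rw [List.drop_eq_getElem_cons h]
    have hgt : ¬ ((nums.take j).sum - (nums.take b).sum + nums[j] ≤ possible) := by omega
    simp only [gseg, if_neg hgt]
    have : (nums.take (j + 1)).sum - (nums.take j).sum = nums[j] := by omega
    rw [this]
    push_cast
    ring
  | case2 j cuts b h hcut ih =>
    rw [pref_getD nums (j + 1) (by omega), pref_getD nums b hb] at hcut
    have htake : (nums.take (j + 1)).sum = (nums.take j).sum + nums[j] :=
      List.sum_take_succ nums j h
    rw [ih (by omega) hb]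
    rw [List.drop_eq_getElem_cons h]
    have hle : (nums.take j).sum - (nums.take b).sum + nums[j] ≤ possible := by omega
    simp only [gseg, if_pos hle]
    have : (nums.take (j + 1)).sum - (nums.take b).sum
        = (nums.take j).sum - (nums.take b).sum + nums[j] := by omega
    rw [this]
  | case3 j cuts b h =>
    have : nums.length ≤ j := by omega
    rw [List.drop_eq_nil_of_le this]
    simp [gseg]

theorem check_alt_eq (nums : List Int) (m : Int) (possible : Int) :
    check_alt nums m possible =
      match gcount possible nums with
      | none => false
      | some k => decide ((k : Int) ≤ m) := by
  unfold check_alt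
  by_cases hbig : nums.any (fun x => decide (x > possible))
  · obtain ⟨x, hx, hb⟩ := List.any_eq_true.mp hbig
    rw [gcount_none_of_big possible nums ⟨x, hx, by simpa using hb⟩]
    simp [hbig]
  · have hall : ∀ x ∈ nums, ¬ x > possible := by
      intro x hx
      simp only [List.any_eq_true, not_exists, not_and] at hbig
      have := hbig x hx
      simpa using this
    rw [gcount_eq_gN possible nums hall]
    rcases nums with _ | ⟨x, xs⟩
    · simp [hbig, gN]
    · rw [if_neg (by simpa using hbig)]
      simp only [List.isEmpty_cons, Bool.false_eq_true, if_false]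
      rw [cutLoop_eq (x :: xs) possible 1 0 0 (by simp) (by simp)]
      simp only [List.take_succ_cons, List.take_zero, List.sum_cons, List.sum_nil,
        List.drop_succ_cons, List.drop_zero, add_zero, sub_zero, zero_add]
      have h2 : ((gN possible (x :: xs) : Nat) : Int) = (gseg possible x xs : Int) + 1 := by
        have hgN : gN possible (x :: xs) = 1 + gseg possible x xs := rfl
        rw [hgN]; push_cast; ring
      rw [h2]

-- ===== VERDICT (by name: the statement is the Claim_ definition above) =====
theorem check_spec : Claim_equal_check := by
  intro nums m possible _
  unfold Spec_check check
  rw [checkOuter_eq nums m possible 0 0 (by omega) le_rfl, check_alt_eq]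
  simp
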